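-- pv_equiv track=rewrite | github.com/sundar91/dsa | Graph/max-depth.py | solve
-- ===== SOURCE A (Python) =====
-- from collections import defaultdict
--
-- def solve(A, B, C, D, E, F):
--
--     g = defaultdict(list)
--     for i in range(len(B)):
--         g[B[i]].append(C[i])
--         g[C[i]].append(B[i])
--
--     levels = defaultdict(list)
--
--     visited = {}
--
--     def findDepth(node, l):
--
--         visited[node] = True
--         levels[l].append(D[node - 1])
--         max1 = 0
--         for u in g[node]:
--             if u not in visited:
--                 depth = findDepth(u, l + 1)
--                 max1 = max(max1, depth + 1)
--
--         return max1
--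
--     def binarySearch(x, searchlist):
--         s, e = 0, len(searchlist) - 1
--         ans = -1
--         while s <= e:
--             mid = s + (e - s) // 2
--
--             if searchlist[mid] >= x:
--                 ans = searchlist[mid]
--                 e = mid - 1
--             else:
--                 s = mid + 1
--
--         return ans
--
--     d = findDepth(1, 0)
--
--     for lv in levels:
--         levels[lv].sort()
--
--     res = []
--
--     for i in range(len(E)):
--         l = E[i] % (d + 1)
--         res.append(binarySearch(F[i], levels[l]))
--
--     return res
-- ===== SOURCE B (Python) =====
-- def solve(A, B, C, D, E, F):
--     # Iterative stack-based DFS (explicit stack, visited re-checked at pop) instead of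
--     # recursion; per level we track the max level seen instead of returning subtree heights;
--     # each query is answered by a first-match scan of the sorted level list.
--     g = {}
--     for b, c in zip(B, C):
--         g.setdefault(b, []).append(c)
--         g.setdefault(c, []).append(b)
--
--     levels = {}
--     visited = set()
--     d = 0
--     stack = [(1, 0)]
--     while stack:
--         node, l = stack.pop()
--         if node in visited:
--             continue
--         visited.add(node)
--         levels.setdefault(l, []).append(D[node - 1])
--         if l > d:
--             d = l
--         for u in reversed(g.get(node, [])):
--             stack.append((u, l + 1))
--
--     levels = {l: sorted(v) for l, v in levels.items()}
--
--     res = []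
--     for e, f in zip(E, F):
--         lst = levels.get(e % (d + 1), [])
--         res.append(next((v for v in lst if v >= f), -1))
--     return res
-- ===== Notes on version B (the rewrite author's own statement) =====
-- stated objective: alternative
-- what changed: The recursive findDepth DFS is replaced by an iterative explicit-stack DFS (visited re-checked at pop, so preorder and levels are identical on every graph, cyclic or not) that tracks the maximum level seen instead of returning subtree heights; edges and queries are paired with zip instead of indexed loops, level lists are sorted by a dict comprehension, and each query is answered by a first-match scan of the sorted level list instead of a hand-written binary search.
import Mathlib
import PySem

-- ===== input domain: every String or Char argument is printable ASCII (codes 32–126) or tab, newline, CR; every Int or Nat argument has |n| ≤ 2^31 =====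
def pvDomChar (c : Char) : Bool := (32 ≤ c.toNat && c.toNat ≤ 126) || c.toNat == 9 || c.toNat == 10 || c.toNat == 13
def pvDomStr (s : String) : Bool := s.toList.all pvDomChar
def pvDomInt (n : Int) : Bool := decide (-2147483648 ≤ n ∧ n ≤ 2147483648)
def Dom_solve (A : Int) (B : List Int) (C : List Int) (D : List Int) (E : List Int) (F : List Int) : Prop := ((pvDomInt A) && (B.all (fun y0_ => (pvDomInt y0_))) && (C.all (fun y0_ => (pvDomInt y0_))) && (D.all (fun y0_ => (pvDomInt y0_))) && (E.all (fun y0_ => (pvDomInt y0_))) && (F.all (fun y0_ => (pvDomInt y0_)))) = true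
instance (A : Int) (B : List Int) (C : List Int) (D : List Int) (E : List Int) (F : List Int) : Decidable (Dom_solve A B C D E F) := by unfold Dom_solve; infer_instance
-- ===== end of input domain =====

-- B replaces A's recursive DFS by an explicit-stack iterative DFS (visited re-checked at
-- pop, so the preorder and the level of every node are identical), tracks d as the maximum
-- level seen instead of returning subtree heights, and answers each query by a first-match
-- scan of the sorted level list instead of A's hand-written binary search.  Alternative
-- decomposition, not claimed faster.

-- ===== PORT A =====
-- while-loop of A's inner binarySearch; fuel-free well-founded recursion on the window size
def binLoopA (x : Int) (lst : List Int) (s e ans : Int) : Int :=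
  if h : s ≤ e then
    let mid := s + PySem.Int.floordiv (e - s) 2
    if PySem.List.pyGetD lst mid 0 ≥ x then
      binLoopA x lst s (mid - 1) (PySem.List.pyGetD lst mid 0)
    else
      binLoopA x lst (mid + 1) e ans
  else ans
termination_by (e + 1 - s).toNat
decreasing_by
  · have := PySem.Int.floordiv_eq_ediv_of_pos (a := e - s) (b := 2) (by omega)
    simp only [this]; omega
  · have := PySem.Int.floordiv_eq_ediv_of_pos (a := e - s) (b := 2) (by omega)
    simp only [this]; omega

def binSearchA (x : Int) (lst : List Int) : Int :=
  binLoopA x lst 0 ((lst.length : Int) - 1) (-1)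

-- A's recursive findDepth; levels/visited threaded as state, fuel makes it total
-- (none = fuel exhausted, never reached with the fuel solve passes — proved below).
mutual
def findA (g : PySem.Dict Int (List Int)) (Dl : List Int) :
    Nat → Int → Int → PySem.Dict Int Bool → PySem.Dict Int (List Int) →
    Option (PySem.Dict Int Bool × PySem.Dict Int (List Int) × Int)
  | 0, _, _, _, _ => none
  | fuel + 1, node, l, vis, lev =>
      goA g Dl fuel (g.getD node []) l (vis.insert node true)
        (lev.modify l [] (fun v => v ++ [PySem.List.pyGetD Dl (node - 1) 0])) 0
  termination_by fuel _ _ _ _ => (fuel, 0)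
-- the 'for u in g[node]' loop of findDepth
def goA (g : PySem.Dict Int (List Int)) (Dl : List Int) :
    Nat → List Int → Int → PySem.Dict Int Bool → PySem.Dict Int (List Int) → Int →
    Option (PySem.Dict Int Bool × PySem.Dict Int (List Int) × Int)
  | _, [], _, vis, lev, m => some (vis, lev, m)
  | fuel, u :: us, l, vis, lev, m =>
      if vis.contains u then goA g Dl fuel us l vis lev m
      else match findA g Dl fuel u (l + 1) vis lev with
        | none => none
        | some (vis', lev', dep) => goA g Dl fuel us l vis' lev' (max m (dep + 1))
  termination_by fuel us _ _ _ _ => (fuel, us.length + 1)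
end

def solve (A : Int) (B : List Int) (C : List Int) (D : List Int) (E : List Int) (F : List Int) : List Int :=
  let g := (PySem.List.pyRange 0 (B.length : Int) 1).foldl
      (fun g i =>
        ((g.modify (PySem.List.pyGetD B i 0) [] (fun v => v ++ [PySem.List.pyGetD C i 0])).modify
          (PySem.List.pyGetD C i 0) [] (fun v => v ++ [PySem.List.pyGetD B i 0])))
      PySem.Dict.empty
  match findA g D (B.length + C.length + 2) 1 0 PySem.Dict.empty PySem.Dict.empty with
  | none => []
  | some (_, levs, d) =>
    let levs2 := levs.keys.foldl
      (fun lv k => lv.modify k [] (fun v => PySem.List.sorted v (fun x => x) false)) levs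
    (PySem.List.pyRange 0 (E.length : Int) 1).foldl
      (fun res i => res ++ [binSearchA (PySem.List.pyGetD F i 0)
        (levs2.getD (PySem.Int.mod (PySem.List.pyGetD E i 0) (d + 1)) [])]) []

-- ===== PORT B =====
-- B's 'while stack:' loop; the stack top is the list head, so pushing the REVERSED
-- neighbour list element-wise is prepending the neighbour list in order.
def loopB (g : PySem.Dict Int (List Int)) (Dl : List Int) :
    Nat → List (Int × Int) → PySem.Set Int → PySem.Dict Int (List Int) → Int →
    Option (PySem.Set Int × PySem.Dict Int (List Int) × Int)
  | _, [], vis, lev, d => some (vis, lev, d)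
  | 0, _ :: _, _, _, _ => none
  | fuel + 1, (node, l) :: rest, vis, lev, d =>
      if PySem.Set.contains vis node then loopB g Dl fuel rest vis lev d
      else
        loopB g Dl fuel ((g.getD node []).map (fun u => (u, l + 1)) ++ rest)
          (PySem.Set.add vis node)
          (lev.modify l [] (fun v => v ++ [PySem.List.pyGetD Dl (node - 1) 0]))
          (if d < l then l else d)

def solve_alt (A : Int) (B : List Int) (C : List Int) (D : List Int) (E : List Int) (F : List Int) : List Int :=
  let g := (B.zip C).foldl
      (fun g p => ((g.modify p.1 [] (fun v => v ++ [p.2])).modify p.2 [] (fun v => v ++ [p.1])))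
      PySem.Dict.empty
  match loopB g D ((B.length + C.length + 2) * (2 * B.length + 3)) [(1, 0)]
      PySem.Set.empty PySem.Dict.empty 0 with
  | none => []
  | some (_, levs, d) =>
    let levs2 := levs.items.foldl
      (fun acc p => acc.insert p.1 (PySem.List.sorted p.2 (fun x => x) false)) PySem.Dict.empty
    (E.zip F).foldl
      (fun res p => res ++ [((levs2.getD (PySem.Int.mod p.1 (d + 1)) []).find?
        (fun v => decide (p.2 ≤ v))).getD (-1)]) []

-- ===== PRECONDITION & SPEC =====
-- nodes connected to node 1 through the first |B| edges, as an iterated closure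
def pvStep (es : List (Int × Int)) (s : PySem.Set Int) : PySem.Set Int :=
  es.foldl (fun s p =>
    if PySem.Set.contains s p.1 || PySem.Set.contains s p.2
    then PySem.Set.add (PySem.Set.add s p.1) p.2 else s) s
def pvReach (B C : List Int) : PySem.Set Int :=
  (pvStep (B.zip C))^[2 * B.length + 1] (PySem.Set.ofList [1])

-- Pre_ excludes exactly the inputs where A raises: C shorter than B (IndexError building
-- the graph), F shorter than E (IndexError in the query loop), or some node connected to
-- node 1 whose D[node-1] index is out of range (IndexError inside findDepth).
def Pre_solve (A : Int) (B : List Int) (C : List Int) (D : List Int) (E : List Int) (F : List Int) : Prop :=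
  B.length ≤ C.length ∧ E.length ≤ F.length ∧
    ∀ v ∈ pvReach B C, PySem.Raise.InRange D.length (v - 1)
instance (A : Int) (B : List Int) (C : List Int) (D : List Int) (E : List Int) (F : List Int) : Decidable (Pre_solve A B C D E F) := by unfold Pre_solve; infer_instance

def pvWitness_solve : Int × List Int × List Int × List Int × List Int × List Int :=
  (0, [1, 2], [2, 3], [5, 4, 6], [0, 1], [3, 10])

def Spec_solve (A : Int) (B : List Int) (C : List Int) (D : List Int) (E : List Int) (F : List Int) (out : List Int) : Prop := out = solve_alt A B C D E F
instance (A : Int) (B : List Int) (C : List Int) (D : List Int) (E : List Int) (F : List Int) (out : List Int) : Decidable (Spec_solve A B C D E F out) := by unfold Spec_solve; infer_instance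

-- ===== CLAIM (what is proved, stated in full; the proofs are below) =====
def Claim_equal_solve : Prop := ∀ (A : Int) (B : List Int) (C : List Int) (D : List Int) (E : List Int) (F : List Int), Dom_solve A B C D E F → Pre_solve A B C D E F → Spec_solve A B C D E F (solve A B C D E F)
-- ===== LEMMAS AND PROOFS =====

-- an indexed loop 'for i in range(len(B)): … B[i] … C[i] …' is a loop over zip(B, C)
theorem pvZipfold {β : Type} (step : β → Int → Int → β) (Bs Cs : List Int) (init : β)
    (h : Bs.length ≤ Cs.length) :
    (PySem.List.pyRange 0 (Bs.length : Int) 1).foldl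
      (fun acc i => step acc (PySem.List.pyGetD Bs i 0) (PySem.List.pyGetD Cs i 0)) init
    = (Bs.zip Cs).foldl (fun acc p => step acc p.1 p.2) init := by
  have hz : (Bs.zip Cs).length = Bs.length := by simp [List.length_zip]; omega
  have h1 : (PySem.List.pyRange 0 (Bs.length : Int) 1).foldl
      (fun acc i => step acc (PySem.List.pyGetD Bs i 0) (PySem.List.pyGetD Cs i 0)) init
    = (PySem.List.pyRange 0 ((Bs.zip Cs).length : Int) 1).foldl
      (fun acc i => step acc (PySem.List.pyGetD (Bs.zip Cs) i (0,0)).1 (PySem.List.pyGetD (Bs.zip Cs) i (0,0)).2) init := by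
    rw [hz]
    apply PySem.List.foldl_congr_mem
    intro acc x hx
    rw [PySem.List.mem_pyRange_one] at hx
    have hxB : x < (Bs.length : Int) := hx.2
    have hxz : x < ((Bs.zip Cs).length : Int) := by omega
    rw [PySem.List.pyGetD_eq_getElem _ _ hx.1 hxB,
        PySem.List.pyGetD_eq_getElem _ _ hx.1 (by omega : x < (Cs.length : Int)),
        PySem.List.pyGetD_eq_getElem _ _ hx.1 hxz]
    simp [List.getElem_zip]
  rw [h1]
  have := PySem.List.foldl_pyRange_pyGetD' (Bs.zip Cs) (0,0)
    (fun acc p => step acc p.1 p.2) init (a := 0) (by omega)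
  simpa using this

def pvUniv (B C : List Int) : List Int := 1 :: (B ++ C)

def pvUnvis (xs : List Int) (p : Int → Bool) : Nat := (xs.filter (fun v => ! p v)).length

theorem pvUnvis_le_length (xs : List Int) (p : Int → Bool) : pvUnvis xs p ≤ xs.length := by
  exact List.length_filter_le _ _

theorem pvUnvis_mono (xs : List Int) (p q : Int → Bool)
    (h : ∀ x, p x = true → q x = true) : pvUnvis xs q ≤ pvUnvis xs p := by
  unfold pvUnvis
  induction xs with
  | nil => simp
  | cons a t ih =>
    by_cases hq : q a
    · by_cases hp : p a <;> simp [List.filter_cons, hp, hq] <;> omega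
    · have hp : p a = false := by
        cases hpa : p a
        · rfl
        · exact absurd (h a hpa) (by simp [hq])
      simp [List.filter_cons, hp, hq]; omega

theorem pvFilter_lt (xs : List Int) (p q : Int → Bool) (n : Int) (hn : n ∈ xs)
    (hpn : p n = false) (hq : ∀ x, q x = true ↔ (p x = true ∨ x = n)) :
    (xs.filter (fun v => ! q v)).length < (xs.filter (fun v => ! p v)).length := by
  induction xs with
  | nil => simp at hn
  | cons a t ih =>
    have hmono : (t.filter (fun v => ! q v)).length ≤ (t.filter (fun v => ! p v)).length :=
      pvUnvis_mono t p q (fun x hx => (hq x).2 (Or.inl hx))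
    rw [List.filter_cons, List.filter_cons]
    rcases List.mem_cons.1 hn with rfl | hmem
    · have hqa : q n = true := (hq n).2 (Or.inr rfl)
      simp only [hqa, hpn, Bool.not_true, Bool.not_false, if_false, if_true]
      simpa using Nat.lt_succ_of_le hmono
    · have hle : q a = true → p a = true ∨ a = n := fun h => (hq a).1 h
      by_cases hqa : q a
      · rcases hle hqa with hpa | rfl
        · simp only [hqa, hpa, Bool.not_true, if_false]
          exact ih hmem
        · simp only [hqa, hpn, Bool.not_true, Bool.not_false, if_false, if_true]
          simpa using Nat.lt_succ_of_le hmono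
      · have hpa : p a = false := by
          cases hpaa : p a
          · rfl
          · exact absurd ((hq a).2 (Or.inl hpaa)) (by simp [hqa])
        simp only [hqa, hpa, Bool.not_false, if_true]
        simpa using Nat.succ_lt_succ (ih hmem)

theorem pvUnvis_lt (xs : List Int) (p q : Int → Bool) (n : Int) (hn : n ∈ xs)
    (hpn : p n = false) (hq : ∀ x, q x = true ↔ (p x = true ∨ x = n)) :
    pvUnvis xs q < pvUnvis xs p := by
  unfold pvUnvis
  exact pvFilter_lt xs p q n hn hpn hq

-- two modifies per edge = one modify per half-edge
def pvDoubled (Bs Cs : List Int) : List (Int × Int) :=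
  (Bs.zip Cs).flatMap (fun p => [(p.1, p.2), (p.2, p.1)])

theorem pvBuild_eq (Bs Cs : List Int) (d : PySem.Dict Int (List Int)) :
    (Bs.zip Cs).foldl
      (fun g p => ((g.modify p.1 [] (fun v => v ++ [p.2])).modify p.2 [] (fun v => v ++ [p.1]))) d
    = (pvDoubled Bs Cs).foldl (fun g p => g.modify p.1 [] (fun v => v ++ [p.2])) d := by
  unfold pvDoubled
  induction Bs.zip Cs generalizing d with
  | nil => simp
  | cons a t ih => simp only [List.flatMap_cons, List.foldl_cons, List.foldl_append] at *; exact ih _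

theorem pvGvals_mem (Bs Cs : List Int) (n v : Int)
    (hv : v ∈ ((Bs.zip Cs).foldl
      (fun g p => ((g.modify p.1 [] (fun v => v ++ [p.2])).modify p.2 [] (fun v => v ++ [p.1])))
      PySem.Dict.empty).getD n []) : v ∈ pvUniv Bs Cs := by
  rw [pvBuild_eq, PySem.Dict.getD_foldl_modify_append] at hv
  simp only [PySem.Dict.getD_empty, List.nil_append, List.mem_map, List.mem_filter] at hv
  obtain ⟨p, ⟨hp, _⟩, rfl⟩ := hv
  unfold pvDoubled at hp
  simp only [List.mem_flatMap, List.mem_cons, List.not_mem_nil, or_false] at hp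
  obtain ⟨q, hq, hcase⟩ := hp
  have := List.of_mem_zip hq
  rcases hcase with rfl | rfl
  · simp [pvUniv]; tauto
  · simp [pvUniv]; tauto

theorem pvAdj_len (Bs Cs : List Int) (n : Int) :
    (((Bs.zip Cs).foldl
      (fun g p => ((g.modify p.1 [] (fun v => v ++ [p.2])).modify p.2 [] (fun v => v ++ [p.1])))
      PySem.Dict.empty).getD n []).length ≤ 2 * (Bs.zip Cs).length := by
  rw [pvBuild_eq, PySem.Dict.getD_foldl_modify_append]
  simp only [PySem.Dict.getD_empty, List.nil_append, List.length_map]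
  calc (List.filter (fun p => p.1 == n) (pvDoubled Bs Cs)).length
      ≤ (pvDoubled Bs Cs).length := List.length_filter_le _ _
    _ ≤ 2 * (Bs.zip Cs).length := by
        unfold pvDoubled
        induction Bs.zip Cs with
        | nil => simp
        | cons a t ih => simp [List.flatMap_cons]; omega

theorem pvSetContains_add (s : PySem.Set Int) (n x : Int) :
    PySem.Set.contains (PySem.Set.add s n) x = (PySem.Set.contains s x || x == n) := by
  simp only [PySem.Set.contains, PySem.Set.add]
  by_cases h : List.contains s n = true
  · rw [if_pos h]
    by_cases hx : x = n
    · subst hx; simp only [List.contains_iff_mem] at h ⊢; simp [h]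
    · simp [hx]
  · rw [if_neg h]
    simp [List.mem_append, beq_eq_decide]

theorem pvIfMax (d l : Int) : (if d < l then l else d) = max d l := by
  split_ifs <;> omega

-- findA/goA only grow visited and keep the level keys nodup
theorem pvGrow (g : PySem.Dict Int (List Int)) (Dl : List Int) : ∀ fuel : Nat,
    (∀ node l vis lev vis' lev' m, findA g Dl fuel node l vis lev = some (vis', lev', m) →
      (∀ x, vis.contains x = true → vis'.contains x = true) ∧
      (lev.keys.Nodup → lev'.keys.Nodup)) ∧
    (∀ us l vis lev m0 vis' lev' m, goA g Dl fuel us l vis lev m0 = some (vis', lev', m) →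
      (∀ x, vis.contains x = true → vis'.contains x = true) ∧
      (lev.keys.Nodup → lev'.keys.Nodup)) := by
  intro fuel
  induction fuel with
  | zero =>
    constructor
    · intro node l vis lev vis' lev' m h; simp [findA] at h
    · intro us
      induction us with
      | nil =>
        intro l vis lev m0 vis' lev' m h
        simp [goA] at h
        obtain ⟨rfl, rfl, rfl⟩ := h
        exact ⟨fun x hx => hx, fun h => h⟩
      | cons u us ihus =>
        intro l vis lev m0 vis' lev' m h
        rw [goA] at h
        by_cases hv : vis.contains u
        · rw [if_pos hv] at h; exact ihus _ _ _ _ _ _ _ h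
        · rw [if_neg hv] at h; simp [findA] at h
  | succ f ih =>
    have hA : ∀ node l vis lev vis' lev' m,
        findA g Dl (f + 1) node l vis lev = some (vis', lev', m) →
        (∀ x, vis.contains x = true → vis'.contains x = true) ∧
        (lev.keys.Nodup → lev'.keys.Nodup) := by
      intro node l vis lev vis' lev' m h
      rw [findA] at h
      obtain ⟨h1, h2⟩ := ih.2 _ _ _ _ _ _ _ _ h
      refine ⟨fun x hx => h1 x ?_, fun hnd => h2 ?_⟩
      · rw [PySem.Dict.contains_insert]; simp [hx]
      · simpa [PySem.Dict.modify] using PySem.Dict.nodup_keys_insert lev l _ hnd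
    refine ⟨hA, ?_⟩
    intro us
    induction us with
    | nil =>
      intro l vis lev m0 vis' lev' m h
      simp [goA] at h
      obtain ⟨rfl, rfl, rfl⟩ := h
      exact ⟨fun x hx => hx, fun h => h⟩
    | cons u us ihus =>
      intro l vis lev m0 vis' lev' m h
      rw [goA] at h
      by_cases hv : vis.contains u
      · rw [if_pos hv] at h; exact ihus _ _ _ _ _ _ _ h
      · rw [if_neg hv] at h
        cases hfind : findA g Dl (f + 1) u (l + 1) vis lev with
        | none => rw [hfind] at h; cases h
        | some t =>
          obtain ⟨v1, lev1, dep⟩ := t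
          rw [hfind] at h
          obtain ⟨c1, c2⟩ := hA _ _ _ _ _ _ _ hfind
          obtain ⟨c3, c4⟩ := ihus _ _ _ _ _ _ _ h
          exact ⟨fun x hx => c3 x (c1 x hx), fun hnd => c4 (c2 hnd)⟩

-- the 'max1' accumulator only shifts the result by a max
theorem pvGoShift (g : PySem.Dict Int (List Int)) (Dl : List Int) (fuel : Nat) :
    ∀ us l vis lev a, 0 ≤ a →
      goA g Dl fuel us l vis lev a
        = (goA g Dl fuel us l vis lev 0).map (fun r => (r.1, r.2.1, max a r.2.2)) := by
  intro us
  induction us with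
  | nil => intro l vis lev a ha; simp [goA]; omega
  | cons u us ihus =>
    intro l vis lev a ha
    rw [goA, goA]
    by_cases hv : vis.contains u
    · rw [if_pos hv, if_pos hv]; exact ihus _ _ _ _ ha
    · rw [if_neg hv, if_neg hv]
      cases hfind : findA g Dl fuel u (l + 1) vis lev with
      | none => simp
      | some t =>
        obtain ⟨v1, lev1, dep⟩ := t
        dsimp only
        rw [ihus _ _ _ _ (le_max_left 0 (dep + 1) : (0:Int) ≤ max 0 (dep+1)),
            ihus _ _ _ _ (by omega : (0:Int) ≤ max a (dep + 1))]
        cases goA g Dl fuel us l v1 lev1 0 with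
        | none => simp
        | some r =>
          simp only [Option.map_some]
          refine congrArg some ?_
          obtain ⟨rv, rl, rm⟩ := r
          simp only
          congr 1
          congr 1
          omega

theorem pvGoNonneg (g : PySem.Dict Int (List Int)) (Dl : List Int) (fuel : Nat)
    (us : List Int) (l : Int) (vis : PySem.Dict Int Bool) (lev : PySem.Dict Int (List Int))
    {vis' lev' m} (h : goA g Dl fuel us l vis lev 0 = some (vis', lev', m)) : 0 ≤ m := by
  have := pvGoShift g Dl fuel us l vis lev 0 le_rfl
  rw [h] at this
  simp at this
  omega

theorem pvGoAcc (g : PySem.Dict Int (List Int)) (Dl : List Int) :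
    ∀ fuel us l vis lev m0 vis' lev' m, (0:Int) ≤ m0 →
      goA g Dl fuel us l vis lev m0 = some (vis', lev', m) →
      ∃ mz, goA g Dl fuel us l vis lev 0 = some (vis', lev', mz) ∧ m = max m0 mz ∧ 0 ≤ mz := by
  intro fuel us l vis lev m0 vis' lev' m h0 h
  rw [pvGoShift g Dl fuel us l vis lev m0 h0] at h
  cases hz : goA g Dl fuel us l vis lev 0 with
  | none => rw [hz] at h; cases h
  | some r =>
    obtain ⟨rv, rl, rm⟩ := r
    rw [hz] at h
    simp only [Option.map_some, Option.some.injEq, Prod.mk.injEq] at h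
    obtain ⟨rfl, rfl, rfl⟩ := h
    exact ⟨rm, rfl, rfl, pvGoNonneg g Dl fuel us l vis lev hz⟩

theorem pvFindA_nonneg (g : PySem.Dict Int (List Int)) (Dl : List Int)
    (fuel : Nat) (node l : Int) (vis : PySem.Dict Int Bool) (lev : PySem.Dict Int (List Int))
    {vis' lev' m} (h : findA g Dl fuel node l vis lev = some (vis', lev', m)) : 0 ≤ m := by
  cases fuel with
  | zero => simp [findA] at h
  | succ f =>
    rw [findA] at h
    exact pvGoNonneg g Dl f _ _ _ _ h

-- THE SIMULATION: the explicit stack run of B replays A's recursion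
theorem pvSim (g : PySem.Dict Int (List Int)) (Dl : List Int) : ∀ fuel : Nat,
    (∀ node l vis lev vis' lev' m, findA g Dl fuel node l vis lev = some (vis', lev', m) →
      vis.contains node = false →
      ∀ (visB : PySem.Set Int) (d : Int) rest (resL : PySem.Dict Int (List Int)) (resD : Int),
      (∀ x, vis.contains x = PySem.Set.contains visB x) →
      (∀ vb : PySem.Set Int, (∀ x, vis'.contains x = PySem.Set.contains vb x) →
        ∃ f vo, loopB g Dl f rest vb lev' (max d (l + m)) = some (vo, resL, resD)) →
      ∃ f vo, loopB g Dl f ((node, l) :: rest) visB lev d = some (vo, resL, resD)) ∧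
    (∀ us l vis lev vis' lev' m, goA g Dl fuel us l vis lev 0 = some (vis', lev', m) →
      ∀ (visB : PySem.Set Int) (d : Int) rest (resL : PySem.Dict Int (List Int)) (resD : Int),
      (∀ x, vis.contains x = PySem.Set.contains visB x) → l ≤ d →
      (∀ vb : PySem.Set Int, (∀ x, vis'.contains x = PySem.Set.contains vb x) →
        ∃ f vo, loopB g Dl f rest vb lev' (max d (l + m)) = some (vo, resL, resD)) →
      ∃ f vo, loopB g Dl f (us.map (fun u => (u, l + 1)) ++ rest) visB lev d = some (vo, resL, resD)) := by
  intro fuel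
  induction fuel with
  | zero =>
    refine ⟨?_, ?_⟩
    · intro node l vis lev vis' lev' m h; simp [findA] at h
    · intro us
      induction us with
      | nil =>
        intro l vis lev vis' lev' m h visB d rest resL resD hR hld hcont
        simp [goA] at h
        obtain ⟨rfl, rfl, rfl⟩ := h
        obtain ⟨f, vo, hf⟩ := hcont visB hR
        refine ⟨f, vo, ?_⟩
        rw [(by omega : max d (l + 0) = d)] at hf
        simpa using hf
      | cons u us ihus =>
        intro l vis lev vis' lev' m h visB d rest resL resD hR hld hcont
        rw [goA] at h
        by_cases hv : vis.contains u
        · rw [if_pos hv] at h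
          obtain ⟨f2, vo, h2⟩ := ihus l vis lev vis' lev' m h visB d rest resL resD hR hld hcont
          refine ⟨f2 + 1, vo, ?_⟩
          simp only [List.map_cons, List.cons_append]
          rw [loopB, if_pos (by rw [← hR u]; exact hv)]
          exact h2
        · rw [if_neg hv] at h; simp [findA] at h
  | succ f ih =>
    obtain ⟨ih1, ih2⟩ := ih
    have hP1 : ∀ node l vis lev vis' lev' m,
        findA g Dl (f + 1) node l vis lev = some (vis', lev', m) →
        vis.contains node = false →
        ∀ (visB : PySem.Set Int) (d : Int) rest (resL : PySem.Dict Int (List Int)) (resD : Int),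
        (∀ x, vis.contains x = PySem.Set.contains visB x) →
        (∀ vb : PySem.Set Int, (∀ x, vis'.contains x = PySem.Set.contains vb x) →
          ∃ f vo, loopB g Dl f rest vb lev' (max d (l + m)) = some (vo, resL, resD)) →
        ∃ f vo, loopB g Dl f ((node, l) :: rest) visB lev d = some (vo, resL, resD) := by
      intro node l vis lev vis' lev' m h hnode visB d rest resL resD hR hcont
      rw [findA] at h
      have hmnn : (0:Int) ≤ m := pvGoNonneg g Dl f _ _ _ _ h
      have hR1 : ∀ x, (vis.insert node true).contains x
          = PySem.Set.contains (PySem.Set.add visB node) x := by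
        intro x
        rw [PySem.Dict.contains_insert, pvSetContains_add, hR x, Bool.or_comm]
      obtain ⟨f2, vo, h2⟩ := ih2 (g.getD node []) l (vis.insert node true) _ vis' lev' m h
        (PySem.Set.add visB node) (max d l) rest resL resD hR1 (le_max_right d l)
        (by
          intro vb hRb
          rw [(by omega : max (max d l) (l + m) = max d (l + m))]
          exact hcont vb hRb)
      refine ⟨f2 + 1, vo, ?_⟩
      rw [loopB, if_neg (by rw [← hR node, hnode]; simp), pvIfMax]
      exact h2
    refine ⟨hP1, ?_⟩
    intro us
    induction us with
    | nil =>
      intro l vis lev vis' lev' m h visB d rest resL resD hR hld hcont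
      simp [goA] at h
      obtain ⟨rfl, rfl, rfl⟩ := h
      obtain ⟨f2, vo, hf⟩ := hcont visB hR
      refine ⟨f2, vo, ?_⟩
      rw [(by omega : max d (l + 0) = d)] at hf
      simpa using hf
    | cons u us ihus =>
      intro l vis lev vis' lev' m h visB d rest resL resD hR hld hcont
      rw [goA] at h
      by_cases hv : vis.contains u
      · rw [if_pos hv] at h
        obtain ⟨f2, vo, h2⟩ := ihus l vis lev vis' lev' m h visB d rest resL resD hR hld hcont
        refine ⟨f2 + 1, vo, ?_⟩
        simp only [List.map_cons, List.cons_append]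
        rw [loopB, if_pos (by rw [← hR u]; exact hv)]
        exact h2
      · rw [if_neg hv] at h
        cases hfind : findA g Dl (f + 1) u (l + 1) vis lev with
        | none => rw [hfind] at h; cases h
        | some t =>
          obtain ⟨v1, lev1, dep⟩ := t
          rw [hfind] at h
          obtain ⟨mz, h0, hm, hmznn⟩ :=
            pvGoAcc g Dl (f + 1) us l v1 lev1 (max 0 (dep + 1)) vis' lev' m
              (le_max_left 0 (dep + 1)) h
          have hstack : ((u :: us).map (fun u => (u, l + 1)) ++ rest)
              = (u, l + 1) :: (us.map (fun u => (u, l + 1)) ++ rest) := by simp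
          rw [hstack]
          refine hP1 u (l + 1) vis lev v1 lev1 dep hfind (by simpa using hv) visB d
            (us.map (fun u => (u, l + 1)) ++ rest) resL resD hR ?_
          intro vb hRb
          refine ihus l v1 lev1 vis' lev' mz h0 vb (max d (l + 1 + dep)) rest resL resD hRb
            (by omega) ?_
          intro vb2 hRb2
          rw [(by omega : max (max d (l + 1 + dep)) (l + mz) = max d (l + m))]
          exact hcont vb2 hRb2

-- fuel sufficiency for A's recursion
theorem pvSuffA (Bs Cs : List Int) (Dl : List Int)
    (g : PySem.Dict Int (List Int))
    (hg : ∀ n v, v ∈ g.getD n [] → v ∈ pvUniv Bs Cs) : ∀ fuel : Nat,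
    (∀ node l vis lev, node ∈ pvUniv Bs Cs → vis.contains node = false →
      pvUnvis (pvUniv Bs Cs) (fun x => vis.contains x) < fuel →
      (findA g Dl fuel node l vis lev).isSome) ∧
    (∀ us l vis lev m, (∀ u ∈ us, u ∈ pvUniv Bs Cs) →
      pvUnvis (pvUniv Bs Cs) (fun x => vis.contains x) < fuel →
      (goA g Dl fuel us l vis lev m).isSome) := by
  intro fuel
  induction fuel with
  | zero => exact ⟨fun _ _ _ _ _ _ h => by omega, fun _ _ _ _ _ _ h => by omega⟩
  | succ f ih =>
    have hA : ∀ node l vis lev, node ∈ pvUniv Bs Cs → vis.contains node = false →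
        pvUnvis (pvUniv Bs Cs) (fun x => vis.contains x) < f + 1 →
        (findA g Dl (f + 1) node l vis lev).isSome := by
      intro node l vis lev hnode hvn hmu
      rw [findA]
      apply ih.2 _ _ _ _ _ (fun u hu => hg node u hu)
      have := pvUnvis_lt (pvUniv Bs Cs) (fun x => vis.contains x)
        (fun x => (vis.insert node true).contains x) node hnode hvn
        (by
          intro x
          dsimp only
          rw [PySem.Dict.contains_insert]
          constructor
          · intro hx
            rcases Bool.or_eq_true_iff.mp hx with hx | hx
            · exact Or.inr (by simpa using hx)
            · exact Or.inl hx
          · intro hx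
            rcases hx with hx | rfl
            · simp [hx]
            · simp)
      omega
    refine ⟨hA, ?_⟩
    intro us
    induction us with
    | nil => intro l vis lev m _ _; simp [goA]
    | cons u us ihus =>
      intro l vis lev m hus hmu
      rw [goA]
      by_cases hv : vis.contains u
      · rw [if_pos hv]
        exact ihus l vis lev m (fun x hx => hus x (List.mem_cons_of_mem u hx)) hmu
      · rw [if_neg hv]
        cases hfind : findA g Dl (f + 1) u (l + 1) vis lev with
        | none =>
          exact absurd (hA u (l + 1) vis lev (hus u List.mem_cons_self) (by simpa using hv) hmu)
            (by simp [hfind])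
        | some t =>
          obtain ⟨v1, lev1, dep⟩ := t
          have hgrow := (pvGrow g Dl (f + 1)).1 _ _ _ _ _ _ _ hfind
          have hmu1 : pvUnvis (pvUniv Bs Cs) (fun x => v1.contains x)
              ≤ pvUnvis (pvUniv Bs Cs) (fun x => vis.contains x) :=
            pvUnvis_mono _ _ _ (fun x hx => hgrow.1 x hx)
          exact ihus l v1 lev1 _ (fun x hx => hus x (List.mem_cons_of_mem u hx)) (by omega)

-- fuel monotonicity and sufficiency for B's stack loop
theorem pvLoopB_mono (g : PySem.Dict Int (List Int)) (Dl : List Int) :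
    ∀ fuel fuel' stack vis lev d r, fuel ≤ fuel' →
      loopB g Dl fuel stack vis lev d = some r → loopB g Dl fuel' stack vis lev d = some r := by
  intro fuel
  induction fuel with
  | zero =>
    intro fuel' stack vis lev d r _ h
    cases stack with
    | nil => simpa [loopB] using h
    | cons p rest => simp [loopB] at h
  | succ f ih =>
    intro fuel' stack vis lev d r hle h
    cases stack with
    | nil => simpa [loopB] using h
    | cons p rest =>
      obtain ⟨node, l⟩ := p
      obtain ⟨f', rfl⟩ : ∃ f', fuel' = f' + 1 := ⟨fuel' - 1, by omega⟩
      rw [loopB] at h ⊢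
      by_cases hv : PySem.Set.contains vis node
      · rw [if_pos hv] at h ⊢; exact ih f' _ _ _ _ _ (by omega) h
      · rw [if_neg hv] at h ⊢; exact ih f' _ _ _ _ _ (by omega) h

theorem pvSuffB (Bs Cs : List Int) (Dl : List Int)
    (g : PySem.Dict Int (List Int))
    (hg : ∀ n v, v ∈ g.getD n [] → v ∈ pvUniv Bs Cs)
    (hlen : ∀ n, (g.getD n []).length ≤ 2 * (Bs.zip Cs).length) : ∀ fuel : Nat,
    ∀ stack vis lev d, (∀ p ∈ stack, p.1 ∈ pvUniv Bs Cs) →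
      stack.length + pvUnvis (pvUniv Bs Cs) (fun x => PySem.Set.contains vis x) * (2 * (Bs.zip Cs).length + 1) < fuel →
      (loopB g Dl fuel stack vis lev d).isSome := by
  intro fuel
  induction fuel with
  | zero => intro stack vis lev d _ h; omega
  | succ f ih =>
    intro stack vis lev d hstack harith
    cases stack with
    | nil => simp [loopB]
    | cons p rest =>
      obtain ⟨node, l⟩ := p
      rw [loopB]
      by_cases hv : PySem.Set.contains vis node
      · rw [if_pos hv]
        apply ih rest vis lev d (fun p hp => hstack p (List.mem_cons_of_mem _ hp))
        simp only [List.length_cons] at harith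
        omega
      · rw [if_neg hv]
        apply ih
        · intro p hp
          rcases List.mem_append.mp hp with hp | hp
          · obtain ⟨u, hu, rfl⟩ := List.mem_map.mp hp
            exact hg node u hu
          · exact hstack p (List.mem_cons_of_mem _ hp)
        · have hlt := pvUnvis_lt (pvUniv Bs Cs)
            (fun x => PySem.Set.contains vis x)
            (fun x => PySem.Set.contains (PySem.Set.add vis node) x)
            node (hstack (node, l) List.mem_cons_self) (by simpa using hv)
            (by
              intro x
              dsimp only
              rw [pvSetContains_add, Bool.or_eq_true_iff]
              constructor
              · rintro (hx | hx)
                · exact Or.inl hx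
                · exact Or.inr (by simpa using hx)
              · rintro (hx | rfl)
                · exact Or.inl hx
                · exact Or.inr (by simp))
          set K := 2 * (Bs.zip Cs).length with hK
          set mu := pvUnvis (pvUniv Bs Cs) (fun x => PySem.Set.contains vis x) with hmu
          set mu' := pvUnvis (pvUniv Bs Cs)
            (fun x => PySem.Set.contains (PySem.Set.add vis node) x) with hmu'
          have hadj : ((g.getD node []).map (fun u => (u, l + 1))).length ≤ K := by
            simpa using hlen node
          have hmul : mu' * (K + 1) + (K + 1) ≤ mu * (K + 1) := by
            calc mu' * (K + 1) + (K + 1) = (mu' + 1) * (K + 1) := by ring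
              _ ≤ mu * (K + 1) := Nat.mul_le_mul_right _ (by omega)
          simp only [List.length_append, List.length_cons] at harith ⊢
          omega

-- A's binary search on a sorted list is the first-match scan
theorem pvBinLoop_eq (x : Int) (lst : List Int) (hp : lst.Pairwise (· ≤ ·)) :
    ∀ (k : Nat) (s e ans : Int), (e + 1 - s).toNat ≤ k → 0 ≤ s → e < (lst.length : Int) →
    binLoopA x lst s e ans
      = (((lst.drop s.toNat).take (e + 1 - s).toNat).find? (fun v => decide (x ≤ v))).getD ans := by
  intro k
  induction k with
  | zero =>
    intro s e ans hk hs he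
    rw [binLoopA, dif_neg (by omega : ¬ s ≤ e)]
    rw [(by omega : (e + 1 - s).toNat = 0)]
    simp
  | succ k ih =>
    intro s e ans hk hs he
    rw [binLoopA]
    by_cases hse : s ≤ e
    · rw [dif_pos hse]
      dsimp only
      have hfd : PySem.Int.floordiv (e - s) 2 = (e - s) / 2 :=
        PySem.Int.floordiv_eq_ediv_of_pos (by omega)
      rw [hfd]
      generalize hmiddef : s + (e - s) / 2 = mid
      have hmid1 : s ≤ mid := by omega
      have hmid2 : mid ≤ e := by omega
      have hmidlen : mid.toNat < lst.length := by omega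
      have hget : PySem.List.pyGetD lst mid 0 = lst[mid.toNat] :=
        PySem.List.pyGetD_eq_getElem lst 0 (by omega) (by omega)
      -- window decomposition
      have hw : (lst.drop s.toNat).take (e + 1 - s).toNat
          = ((lst.drop s.toNat).take (mid - s).toNat)
            ++ lst[mid.toNat] :: ((lst.drop (mid + 1).toNat).take (e - mid).toNat) := by
        have h0 : (lst.drop s.toNat).take (e + 1 - s).toNat
            = ((lst.drop s.toNat).take (e + 1 - s).toNat).take (mid - s).toNat
              ++ ((lst.drop s.toNat).take (e + 1 - s).toNat).drop (mid - s).toNat :=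
          (List.take_append_drop _ _).symm
        rw [h0, List.take_take, Nat.min_def, if_pos (by omega), List.drop_take, List.drop_drop]
        congr 1
        rw [(by omega : s.toNat + (mid - s).toNat = mid.toNat),
            List.drop_eq_getElem_cons hmidlen,
            (by omega : (e + 1 - s).toNat - (mid - s).toNat = (e - mid).toNat + 1),
            List.take_succ_cons]
        rw [show (mid + 1).toNat = mid.toNat + 1 from by omega]
      rw [hw, List.find?_append, hget]
      by_cases hcmp : lst[mid.toNat] ≥ x
      · rw [if_pos hcmp]
        have hrec := ih s (mid - 1) lst[mid.toNat] (by omega) hs (by omega)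
        rw [hrec, (by omega : (mid - 1 + 1 - s).toNat = (mid - s).toNat)]
        have hcons : (lst[mid.toNat] :: ((lst.drop (mid + 1).toNat).take (e - mid).toNat)).find?
            (fun v => decide (x ≤ v)) = some lst[mid.toNat] := by
          rw [List.find?_cons_of_pos]
          simp [hcmp]
        rw [hcons]
        cases ((lst.drop s.toNat).take (mid - s).toNat).find? (fun v => decide (x ≤ v)) with
        | none => simp
        | some y => simp
      · rw [if_neg hcmp]
        have hrec := ih (mid + 1) e ans (by omega) (by omega) he
        rw [hrec, (by omega : (e + 1 - (mid + 1)).toNat = (e - mid).toNat)]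
        have hnone : ((lst.drop s.toNat).take (mid - s).toNat).find?
            (fun v => decide (x ≤ v)) = none := by
          rw [List.find?_eq_none]
          intro y hy
          obtain ⟨j, hj, rfl⟩ := List.mem_iff_getElem.mp hy
          have hjlt : j < (mid - s).toNat := by
            have := hj
            simp only [List.length_take, List.length_drop] at this
            omega
          rw [List.getElem_take, List.getElem_drop]
          have hidx : s.toNat + j < mid.toNat := by omega
          have hle : lst[s.toNat + j] ≤ lst[mid.toNat] :=
            List.pairwise_iff_getElem.mp hp _ _ _ _ hidx
          simp
          omega
        rw [hnone]
        have hcons : (lst[mid.toNat] :: ((lst.drop (mid + 1).toNat).take (e - mid).toNat)).find?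
            (fun v => decide (x ≤ v))
            = ((lst.drop (mid + 1).toNat).take (e - mid).toNat).find? (fun v => decide (x ≤ v)) := by
          rw [List.find?_cons_of_neg]
          simp
          omega
        rw [hcons]
        simp
    · rw [dif_neg hse]
      rw [(by omega : (e + 1 - s).toNat = 0)]
      simp


theorem pvBinSearch_eq (x : Int) (lst : List Int) (hp : lst.Pairwise (· ≤ ·)) :
    binSearchA x lst = (lst.find? (fun v => decide (x ≤ v))).getD (-1) := by
  unfold binSearchA
  rw [pvBinLoop_eq x lst hp lst.length 0 ((lst.length : Int) - 1) (-1) (by omega) le_rfl (by omega)]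
  rw [(by omega : ((lst.length : Int) - 1 + 1 - 0).toNat = lst.length)]
  simp

-- sorting every value of a dict, by a modify loop over its keys (A) or by rebuilding (B)
theorem pvSortFold (f : List Int → List Int) :
    ∀ (ks : List Int) (d : PySem.Dict Int (List Int)), ks.Nodup → d.keys.Nodup →
      (∀ k ∈ ks, d.contains k = true) →
      (ks.foldl (fun lv k => lv.modify k [] f) d).items
        = d.items.map (fun p => if p.1 ∈ ks then (p.1, f p.2) else p) := by
  intro ks
  induction ks with
  | nil => intro d _ _ _; simp
  | cons k ks ih =>
    intro d hnd hdk hcont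
    have hk : d.contains k = true := hcont k List.mem_cons_self
    have hknotin : k ∉ ks := (List.nodup_cons.mp hnd).1
    rw [List.foldl_cons]
    rw [ih (d.modify k [] f) (List.nodup_cons.mp hnd).2
      (by simpa [PySem.Dict.modify] using PySem.Dict.nodup_keys_insert d k _ hdk)
      (by
        intro k' hk'
        simp only [PySem.Dict.modify]
        rw [PySem.Dict.contains_insert]
        simp [hcont k' (List.mem_cons_of_mem _ hk')])]
    simp only [PySem.Dict.modify]
    rw [PySem.Dict.items_insert_of_contains d _ hk, List.map_map]
    apply List.map_congr_left
    intro p hp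
    simp only [Function.comp_apply]
    by_cases hpk : p.1 = k
    · have hval : d.getD p.1 [] = p.2 := PySem.Dict.getD_of_mem_items d hp hdk []
      have hval2 : d.getD k [] = p.2 := by rw [← hpk]; exact hval
      have hbeq : (p.1 == k) = true := by simp [hpk]
      simp [hbeq, hknotin, hpk, hval2]
    · have hbeq : (p.1 == k) = false := by simp [hpk]
      simp only [hbeq, Bool.false_eq_true, if_false]

      by_cases hin : p.1 ∈ ks
      · simp [hin, hpk]
      · simp [hin, hpk]

theorem pvSortedDicts (lev : PySem.Dict Int (List Int)) (hnd : lev.keys.Nodup) :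
    lev.keys.foldl (fun lv k => lv.modify k [] (fun v => PySem.List.sorted v (fun x => x) false)) lev
    = lev.items.foldl (fun acc p => acc.insert p.1 (PySem.List.sorted p.2 (fun x => x) false)) PySem.Dict.empty := by
  apply PySem.Dict.ext
  rw [pvSortFold _ lev.keys lev hnd hnd
    (fun k hk => (PySem.Dict.contains_iff_mem_keys lev k).mpr hk)]
  rw [PySem.Dict.items_foldl_insert_fresh lev.items (fun p => p.1)
    (fun p => PySem.List.sorted p.2 (fun x => x) false) PySem.Dict.empty
    (fun a _ => PySem.Dict.contains_empty a.1) (by simpa [PySem.Dict.keys] using hnd)]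
  rw [show (PySem.Dict.empty : PySem.Dict Int (List Int)).items = [] from rfl]
  simp only [List.nil_append]
  apply List.map_congr_left
  intro p hp
  simp [PySem.Dict.mem_keys_of_mem_items lev hp]

theorem pvSortedVals (lev : PySem.Dict Int (List Int)) (hnd : lev.keys.Nodup) (k : Int) :
    ((lev.items.foldl (fun acc p => acc.insert p.1 (PySem.List.sorted p.2 (fun x => x) false))
      PySem.Dict.empty).getD k []).Pairwise (· ≤ ·) := by
  set d2 := lev.items.foldl (fun acc p => acc.insert p.1 (PySem.List.sorted p.2 (fun x => x) false))
    PySem.Dict.empty with hd2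
  rw [PySem.Dict.getD_eq_get?_getD]
  cases hq : d2.get? k with
  | none => simp
  | some v =>
    have hmem := PySem.Dict.mem_items_of_get?_eq_some d2 hq
    have hitems : d2.items = lev.items.map
        (fun p => (p.1, PySem.List.sorted p.2 (fun x => x) false)) := by
      rw [hd2, PySem.Dict.items_foldl_insert_fresh lev.items (fun p => p.1)
        (fun p => PySem.List.sorted p.2 (fun x => x) false) PySem.Dict.empty
        (fun a _ => PySem.Dict.contains_empty a.1) (by simpa [PySem.Dict.keys] using hnd),
        show (PySem.Dict.empty : PySem.Dict Int (List Int)).items = [] from rfl]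
      simp
    rw [hitems] at hmem
    simp only [List.mem_map] at hmem
    obtain ⟨q, _, hqv⟩ := hmem
    have hv : v = PySem.List.sorted q.2 (fun x => x) false := by
      have := congrArg Prod.snd hqv
      simpa using this.symm
    rw [Option.getD_some, hv]
    simpa using PySem.List.sorted_pairwise q.2 (fun x => x)

-- ===== VERDICT (by name: the statement is the Claim_ definition above) =====
theorem solve_spec : Claim_equal_solve := by
  intro A B C D E F hDom hPre
  obtain ⟨hBC, hEF, _⟩ := hPre
  unfold Spec_solve solve solve_alt
  dsimp only
  have hgeq := pvZipfold
    (fun g b c => ((g.modify b [] (fun v => v ++ [c])).modify c [] (fun v => v ++ [b])))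
    B C PySem.Dict.empty hBC
  dsimp only at hgeq
  rw [hgeq]
  set g := (B.zip C).foldl
      (fun g p => ((g.modify p.1 [] (fun v => v ++ [p.2])).modify p.2 [] (fun v => v ++ [p.1])))
      PySem.Dict.empty with hgdef
  have hgvals : ∀ n v, v ∈ g.getD n [] → v ∈ pvUniv B C := fun n v hv => pvGvals_mem B C n v hv
  have hglen : ∀ n, (g.getD n []).length ≤ 2 * (B.zip C).length := fun n => pvAdj_len B C n
  have hulen : (pvUniv B C).length = 1 + (B.length + C.length) := by simp [pvUniv]; omega
  -- A's DFS returns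
  have hsomeA := (pvSuffA B C D g hgvals (B.length + C.length + 2)).1 1 0
    PySem.Dict.empty PySem.Dict.empty (by simp [pvUniv]) (PySem.Dict.contains_empty 1)
    (by
      have := pvUnvis_le_length (pvUniv B C) (fun x => PySem.Dict.contains (PySem.Dict.empty : PySem.Dict Int Bool) x)
      omega)
  obtain ⟨r, hfd⟩ := Option.isSome_iff_exists.mp hsomeA
  obtain ⟨visA, lev, m⟩ := r
  have hmnn : (0:Int) ≤ m := pvFindA_nonneg g D _ 1 0 _ _ hfd
  -- B's loop returns, and the simulation says it returns A's levels and depth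
  obtain ⟨f0, vo, hloop0⟩ := (pvSim g D (B.length + C.length + 2)).1 1 0
    PySem.Dict.empty PySem.Dict.empty visA lev m hfd (PySem.Dict.contains_empty 1)
    PySem.Set.empty 0 [] lev m
    (by intro x; simp [PySem.Dict.contains_empty, PySem.Set.contains, PySem.Set.empty])
    (by
      intro vb hRb
      refine ⟨0, vb, ?_⟩
      rw [show max 0 (0 + m) = m by omega]
      simp [loopB])
  have hsomeB := pvSuffB B C D g hgvals hglen ((B.length + C.length + 2) * (2 * B.length + 3))
    [(1, 0)] PySem.Set.empty PySem.Dict.empty 0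
    (by intro p hp; simp at hp; rw [hp]; simp [pvUniv])
    (by
      have h1 : pvUnvis (pvUniv B C) (fun x => PySem.Set.contains PySem.Set.empty x)
          ≤ 1 + (B.length + C.length) := by
        have := pvUnvis_le_length (pvUniv B C) (fun x => PySem.Set.contains PySem.Set.empty x)
        omega
      have h2 : 2 * (B.zip C).length + 1 ≤ 2 * B.length + 1 := by
        have := List.length_zip (l₁ := B) (l₂ := C)
        omega
      have h3 : pvUnvis (pvUniv B C) (fun x => PySem.Set.contains PySem.Set.empty x)
            * (2 * (B.zip C).length + 1) ≤ (1 + (B.length + C.length)) * (2 * B.length + 1) :=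
        Nat.mul_le_mul h1 h2
      have h4 : (1 + (B.length + C.length)) * (2 * B.length + 1) + 2
          ≤ (B.length + C.length + 2) * (2 * B.length + 3) := by nlinarith
      simp only [List.length_cons, List.length_nil]
      omega)
  obtain ⟨rB, hloopB⟩ := Option.isSome_iff_exists.mp hsomeB
  obtain ⟨voB, levB, dB⟩ := rB
  have h1 := pvLoopB_mono g D f0 (max f0 ((B.length + C.length + 2) * (2 * B.length + 3)))
    _ _ _ _ _ (le_max_left _ _) hloop0
  have h2 := pvLoopB_mono g D ((B.length + C.length + 2) * (2 * B.length + 3))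
    (max f0 ((B.length + C.length + 2) * (2 * B.length + 3)))
    _ _ _ _ _ (le_max_right _ _) hloopB
  rw [h1] at h2
  injection h2 with h2
  have h2b : lev = levB := congrArg (fun t => t.2.1) h2
  have h2c : m = dB := congrArg (fun t => t.2.2) h2
  rw [hfd, hloopB]
  dsimp only
  rw [← h2b, ← h2c]
  -- sorted level dicts agree
  have hnd : lev.keys.Nodup :=
    ((pvGrow g D (B.length + C.length + 2)).1 _ _ _ _ _ _ _ hfd).2 PySem.Dict.nodup_keys_empty
  rw [pvSortedDicts lev hnd]
  -- query loops agree
  have hqeq := pvZipfold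
    (fun res e f => res ++ [binSearchA f
      ((lev.items.foldl (fun acc p => acc.insert p.1 (PySem.List.sorted p.2 (fun x => x) false))
        PySem.Dict.empty).getD (PySem.Int.mod e (m + 1)) [])])
    E F ([] : List Int) hEF
  dsimp only at hqeq
  rw [hqeq]
  apply PySem.List.foldl_congr_mem
  intro acc p hp
  rw [pvBinSearch_eq _ _ (pvSortedVals lev hnd _)]
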